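-- pv_equiv track=rewrite | github.com/makavelli666/projet_crypto | decrypter.py | dechiffrer_message_decompresse
-- ===== SOURCE A (Python) =====
-- def dechiffrer_message_decompresse(texte_decompresse: str, cle: str) -> str:
--     """
--     Déchiffre le texte décompressé à l'aide de la clé de chiffrement.
--
--     Parameters:
--         texte_decompresse (str): le texte décompressé à déchiffrer
--         cle (str): la clé de chiffrement
--
--     Returns:
--         le texte déchiffré
--     """
-- # Convertit chaque caractère de la clé en son équivalent ASCII et stocke le résultat dans une liste
--     ecart = [ord(c) for c in cle]
--
--     # Initialise une chaîne vide pour stocker le texte déchiffré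
--     texte_dechiffre = ""
--
--     # Initialise un compteur pour parcourir la clé
--     i = 0
--
--     # Parcourt chaque caractère du texte décompressé
--     for c in texte_decompresse:
--
--         # Détermine si le caractère est une lettre minuscule, une lettre majuscule ou un autre caractère
--         # et stocke son équivalent ASCII dans la variable b
--         b = ord('a') if 'a' <= c <= 'z' else ord('A') if 'A' <= c <= 'Z' else 0
--
--         # Si le caractère est une lettre (minuscule ou majuscule)
--         if b != 0:
--
--             # Calcule l'indice de décalage dans l'alphabet en utilisant la formule de déchiffrement de Vigenère
--             l = ord(c) - b
--             k = ecart[i] - ord('a')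
--             d = chr((l + 26 - k) % 26 + b)
--
--             # Ajoute la lettre déchiffrée au texte déchiffré
--             texte_dechiffre += d
--
--             # Incrémente le compteur pour passer au caractère suivant de la clé
--             i = (i + 1) % len(cle)
--
--         # Si le caractère n'est pas une lettre, il est laissé inchangé
--         else:
--             texte_dechiffre += c
--
--     # Retourne le texte déchiffré
--     return texte_dechiffre
-- ===== SOURCE B (Python) =====
-- def _lettre(c: str) -> bool:
--     return 'a' <= c <= 'z' or 'A' <= c <= 'Z'
--
-- def dechiffrer_message_decompresse(texte_decompresse: str, cle: str) -> str:
--     # Pass 1: decrypt just the ASCII letters, keyed by their letter-position.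
--     decrypted = []
--     for j, c in enumerate(ch for ch in texte_decompresse if _lettre(ch)):
--         base = ord('a') if 'a' <= c <= 'z' else ord('A')
--         shift = ord(cle[j % len(cle)]) - ord('a')
--         decrypted.append(chr((ord(c) - base - shift) % 26 + base))
--     # Pass 2: splice the decrypted letters back over the letter positions.
--     it = iter(decrypted)
--     return ''.join(next(it) if _lettre(ch) else ch for ch in texte_decompresse)
-- ===== Notes on version B (the rewrite author's own statement) =====
-- stated objective: alternative
-- what changed: A interleaves decryption with output in one loop carrying a running key counter; B is a two-pass decomposition: it first decrypts just the filtered ASCII letters into a list indexed by letter position (enumerate + j % len(cle)), then splices that list back over the original text as a consumable iterator.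
-- outside the precondition, e.g. on dechiffrer_message_decompresse('ab', ''): A raises IndexError, B raises ZeroDivisionError
import Mathlib
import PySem

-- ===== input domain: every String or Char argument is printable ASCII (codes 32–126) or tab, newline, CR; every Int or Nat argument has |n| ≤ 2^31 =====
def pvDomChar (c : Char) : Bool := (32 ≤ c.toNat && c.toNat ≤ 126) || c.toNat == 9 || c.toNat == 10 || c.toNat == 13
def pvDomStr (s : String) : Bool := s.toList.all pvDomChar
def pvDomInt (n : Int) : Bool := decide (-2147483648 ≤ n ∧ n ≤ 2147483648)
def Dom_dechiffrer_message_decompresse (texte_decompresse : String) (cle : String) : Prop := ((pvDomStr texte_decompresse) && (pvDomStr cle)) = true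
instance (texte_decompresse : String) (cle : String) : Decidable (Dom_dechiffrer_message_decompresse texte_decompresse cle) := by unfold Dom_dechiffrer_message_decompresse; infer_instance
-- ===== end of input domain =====

-- B replaces A's single loop with its running key counter by a two-pass decomposition:
-- decrypt the letters into a list keyed by letter position, then splice them back over the text (objective: alternative).

-- ===== PORT A =====
-- one loop over the text; key counter i advances only on letters; string built by +=
def pvA_loop (ecart : List Int) (n : Nat) : List Char → Nat → List Char → List Char
  | [], _, acc => acc
  | c :: rest, i, acc =>
    let b : Int := if 'a' ≤ c ∧ c ≤ 'z' then 97 else if 'A' ≤ c ∧ c ≤ 'Z' then 65 else 0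
    if b ≠ 0 then
      match PySem.List.pyGet? ecart (i : Int) with
      | none => acc   -- Python raises IndexError here (empty key); excluded by Pre_
      | some e =>
        let l : Int := (c.toNat : Int) - b
        let k : Int := e - 97
        let d : Char := Char.ofNat (PySem.Int.mod (l + 26 - k) 26 + b).toNat
        pvA_loop ecart n rest ((i + 1) % n) (acc ++ [d])
    else pvA_loop ecart n rest i (acc ++ [c])

def dechiffrer_message_decompresse (texte_decompresse : String) (cle : String) : String :=
  String.ofList (pvA_loop (cle.toList.map (fun ch => (ch.toNat : Int))) cle.toList.length
    texte_decompresse.toList 0 [])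

-- ===== PORT B =====
-- B's helper _lettre: explicit ASCII-letter test
def pvB_letter (c : Char) : Bool := ('a' ≤ c ∧ c ≤ 'z') ∨ ('A' ≤ c ∧ c ≤ 'Z')

-- decrypt one letter whose letter position is j (shift = ord(cle[j % len(cle)]) - ord('a'))
def pvB_dec (cle : List Char) (j : Int) (c : Char) : Char :=
  let base : Int := if 'a' ≤ c ∧ c ≤ 'z' then 97 else 65
  match PySem.Int.mod? j (cle.length : Int) with
  | none => c   -- Python raises ZeroDivisionError here (empty key); excluded by Pre_
  | some r =>
    match PySem.List.pyGet? cle r with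
    | none => c   -- unreachable: 0 ≤ r < len(cle)
    | some kc =>
      let shift : Int := (kc.toNat : Int) - 97
      Char.ofNat (PySem.Int.mod ((c.toNat : Int) - base - shift) 26 + base).toNat

-- pass 2: consume the decrypted-letters queue at letter positions
def pvB_splice : List Char → List Char → List Char
  | [], _ => []
  | c :: rest, q =>
    if pvB_letter c then
      match q with
      | [] => []   -- exhausted iterator: unreachable, the queue has one entry per letter
      | d :: q' => d :: pvB_splice rest q'
    else c :: pvB_splice rest q

def dechiffrer_message_decompresse_alt (texte_decompresse : String) (cle : String) : String :=
  let letters := texte_decompresse.toList.filter pvB_letter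
  let decrypted := (PySem.List.enumerate letters).map (fun p => pvB_dec cle.toList p.1 p.2)
  String.ofList (pvB_splice texte_decompresse.toList decrypted)

-- ===== PRECONDITION & SPEC =====
-- Pre_ excludes exactly the inputs where Python A raises: an empty key together with at
-- least one ASCII letter in the text (A's ecart[i] raises IndexError there; B raises too).
def Pre_dechiffrer_message_decompresse (texte_decompresse : String) (cle : String) : Prop :=
  cle.toList ≠ [] ∨ ∀ c ∈ texte_decompresse.toList, pvB_letter c = false
instance (texte_decompresse : String) (cle : String) : Decidable (Pre_dechiffrer_message_decompresse texte_decompresse cle) := by unfold Pre_dechiffrer_message_decompresse; infer_instance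

def pvWitness_dechiffrer_message_decompresse : String × String := ("Khoor, Zruog!", "key")

def Spec_dechiffrer_message_decompresse (texte_decompresse : String) (cle : String) (out : String) : Prop := out = dechiffrer_message_decompresse_alt texte_decompresse cle
instance (texte_decompresse : String) (cle : String) (out : String) : Decidable (Spec_dechiffrer_message_decompresse texte_decompresse cle out) := by unfold Spec_dechiffrer_message_decompresse; infer_instance

-- ===== CLAIM (what is proved, stated in full; the proofs are below) =====
def Claim_equal_dechiffrer_message_decompresse : Prop := ∀ (texte_decompresse : String) (cle : String), Dom_dechiffrer_message_decompresse texte_decompresse cle → Pre_dechiffrer_message_decompresse texte_decompresse cle → Spec_dechiffrer_message_decompresse texte_decompresse cle (dechiffrer_message_decompresse texte_decompresse cle)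

-- ===== LEMMAS AND PROOFS =====

-- A's accumulator is a pure prefix of its result
theorem pvA_loop_acc (ecart : List Int) (n : Nat) :
    ∀ (rest : List Char) (i : Nat) (acc : List Char),
      pvA_loop ecart n rest i acc = acc ++ pvA_loop ecart n rest i [] := by
  intro rest
  induction rest with
  | nil => intro i acc; simp [pvA_loop]
  | cons c rest ih =>
    intro i acc
    simp only [pvA_loop]
    by_cases hb : (if 'a' ≤ c ∧ c ≤ 'z' then (97:Int) else if 'A' ≤ c ∧ c ≤ 'Z' then 65 else 0) ≠ 0
    · simp only [if_pos hb]
      cases h : PySem.List.pyGet? ecart (i : Int) with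
      | none => simp
      | some e => dsimp only; rw [ih _ (acc ++ _), ih _ ([] ++ _)]; simp
    · simp only [if_neg hb]
      rw [ih _ (acc ++ _), ih _ ([] ++ _)]; simp

theorem pv_letter_iff (c : Char) :
    pvB_letter c = true ↔ (('a' ≤ c ∧ c ≤ 'z') ∨ ('A' ≤ c ∧ c ≤ 'Z')) := by
  simp [pvB_letter]

-- A's chained-if letter base agrees with B's base test on letters
theorem pv_base_eq (c : Char) (ha : pvB_letter c = true) :
    (if 'a' ≤ c ∧ c ≤ 'z' then (97:Int) else if 'A' ≤ c ∧ c ≤ 'Z' then 65 else 0)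
      = (if 'a' ≤ c ∧ c ≤ 'z' then (97:Int) else 65) := by
  rcases (pv_letter_iff c).mp ha with h | h
  · simp [h.1, h.2]
  · by_cases hl : ('a' ≤ c ∧ c ≤ 'z') <;> simp [hl, h.1, h.2]

theorem pv_base_ne_zero (c : Char) (ha : pvB_letter c = true) :
    (if 'a' ≤ c ∧ c ≤ 'z' then (97:Int) else if 'A' ≤ c ∧ c ≤ 'Z' then 65 else 0) ≠ 0 := by
  rcases (pv_letter_iff c).mp ha with h | h
  · simp [h.1, h.2]
  · by_cases hl : ('a' ≤ c ∧ c ≤ 'z') <;> simp [hl, h.1, h.2]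

theorem pv_base_zero (c : Char) (ha : pvB_letter c = false) :
    (if 'a' ≤ c ∧ c ≤ 'z' then (97:Int) else if 'A' ≤ c ∧ c ≤ 'Z' then 65 else 0) = 0 := by
  rw [if_neg, if_neg]
  · intro h; rw [(pv_letter_iff c).mpr (Or.inr h)] at ha; cases ha
  · intro h; rw [(pv_letter_iff c).mpr (Or.inl h)] at ha; cases ha

-- adding 26 before Python's % 26 changes nothing
theorem pv_mod26 (x : Int) : PySem.Int.mod (x + 26) 26 = PySem.Int.mod x 26 := by
  rw [PySem.Int.mod_eq_emod_of_pos (by norm_num), PySem.Int.mod_eq_emod_of_pos (by norm_num)]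
  omega

-- B's per-letter decryption is exactly A's letter branch at key index j % len(cle)
theorem pv_step (cle : List Char) (hn : 0 < cle.length) (c : Char) (j : Nat) :
    pvB_dec cle (j : Int) c
      = Char.ofNat (PySem.Int.mod
            (((c.toNat : Int) - (if 'a' ≤ c ∧ c ≤ 'z' then (97:Int) else 65)) + 26
              - (((cle[j % cle.length]'(Nat.mod_lt _ hn)).toNat : Int) - 97)) 26
          + (if 'a' ≤ c ∧ c ≤ 'z' then (97:Int) else 65)).toNat := by
  have hmod : PySem.Int.mod? (j : Int) (cle.length : Int) = some ((j % cle.length : Nat) : Int) := by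
    simp only [PySem.Int.mod?, if_neg (by omega : (cle.length : Int) ≠ 0)]
    congr 1
    rw [Int.fmod_eq_emod, if_pos (Or.inl (by omega))]
    omega
  have hget : PySem.List.pyGet? cle ((j % cle.length : Nat) : Int)
      = some (cle[j % cle.length]'(Nat.mod_lt _ hn)) := by
    rw [PySem.List.pyGet?_natCast, List.getElem?_eq_getElem (Nat.mod_lt _ hn)]
  simp only [pvB_dec, hmod, hget]
  congr 1
  rw [← pv_mod26 ((c.toNat : Int) - _ - _)]
  ring_nf

-- main invariant: with a nonempty key, A's loop at counter j % n is B's splice of the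
-- decrypted letters of the remaining text, letter positions starting at j
theorem pv_main (cle : List Char) (hcle : cle ≠ []) :
    ∀ (rest : List Char) (j : Nat),
      pvA_loop (cle.map (fun ch => (ch.toNat : Int))) cle.length rest (j % cle.length) []
        = pvB_splice rest
            ((PySem.List.enumerate (rest.filter pvB_letter) (j : Int)).map
              (fun p => pvB_dec cle p.1 p.2)) := by
  have hn : 0 < cle.length := List.length_pos_iff.mpr hcle
  intro rest
  induction rest with
  | nil => intro j; simp [pvA_loop, pvB_splice]
  | cons c rest ih =>
    intro j
    have hidx : j % cle.length < cle.length := Nat.mod_lt _ hn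
    by_cases ha : pvB_letter c = true
    · have hgetA : PySem.List.pyGet? (cle.map (fun ch => (ch.toNat : Int))) ((j % cle.length : Nat) : Int)
          = some ((cle[j % cle.length]'hidx).toNat : Int) := by
        rw [PySem.List.pyGet?_natCast]
        simp [hidx]
      simp only [pvA_loop]
      rw [if_pos (pv_base_ne_zero c ha), hgetA]
      dsimp only
      rw [pv_base_eq c ha, pvA_loop_acc, List.nil_append, List.singleton_append]
      have hj' : (j % cle.length + 1) % cle.length = (j + 1) % cle.length := Nat.mod_add_mod j cle.length 1
      rw [hj', ih (j + 1)]
      simp only [List.filter_cons, ha, if_true, PySem.List.enumerate_cons, List.map_cons,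
        pvB_splice]
      rw [pv_step cle hn c j]
      push_cast
      rfl
    · have ha' : pvB_letter c = false := by simpa using ha
      simp only [pvA_loop]
      rw [pv_base_zero c ha', if_neg (by norm_num), pvA_loop_acc, List.nil_append,
        List.singleton_append, ih j]
      simp only [List.filter_cons, ha', Bool.false_eq_true, if_false, pvB_splice]

-- with no letters in the text, A copies it unchanged (any key, even empty)
theorem pv_A_noletters (ecart : List Int) (n : Nat) :
    ∀ (rest : List Char) (i : Nat), (∀ c ∈ rest, pvB_letter c = false) →
      pvA_loop ecart n rest i [] = rest := by
  intro rest
  induction rest with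
  | nil => intro i _; simp [pvA_loop]
  | cons c rest ih =>
    intro i h
    simp only [pvA_loop]
    rw [pv_base_zero c (h c (List.mem_cons_self)), if_neg (by norm_num), pvA_loop_acc,
      List.nil_append, List.singleton_append, ih i (fun d hd => h d (List.mem_cons_of_mem _ hd))]

-- with no letters, B's splice of the empty queue copies the text unchanged
theorem pv_B_noletters :
    ∀ (rest : List Char), (∀ c ∈ rest, pvB_letter c = false) →
      pvB_splice rest [] = rest := by
  intro rest
  induction rest with
  | nil => intro _; simp [pvB_splice]
  | cons c rest ih =>
    intro h
    simp only [pvB_splice, h c (List.mem_cons_self), Bool.false_eq_true, if_false]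
    rw [ih (fun d hd => h d (List.mem_cons_of_mem _ hd))]

-- ===== VERDICT (by name: the statement is the Claim_ definition above) =====
theorem dechiffrer_message_decompresse_spec : Claim_equal_dechiffrer_message_decompresse := by
  intro t cle _ hpre
  unfold Spec_dechiffrer_message_decompresse dechiffrer_message_decompresse
    dechiffrer_message_decompresse_alt
  rcases hpre with hcle | hno
  · have h0 : (0 : Nat) = 0 % cle.toList.length := (Nat.zero_mod _).symm
    rw [h0, pv_main cle.toList hcle t.toList 0]
    norm_num
  · have hfil : t.toList.filter pvB_letter = [] :=
      List.filter_eq_nil_iff.mpr (by intro c hc; simp [hno c hc])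
    rw [pv_A_noletters _ _ _ _ hno, hfil]
    simp only [PySem.List.enumerate_nil, List.map_nil]
    rw [pv_B_noletters _ hno]
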